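-- pv_equiv track=rewrite | github.com/soyjubilado/AdventOfCode | 2015/03/prog201503.py | ListHouses
-- ===== SOURCE A (Python) =====
-- from collections import defaultdict
--
-- def NextLocation(coord, step):
--   """Given a coordinate and a direction step, return the next coordinate."""
--   x, y = coord
--   if step == '<':
--     x -= 1
--   elif step == '>':
--     x += 1
--   elif step == '^':
--     y += 1
--   elif step == 'v':
--     y -= 1
--   else:
--     raise Exception
--   return (x, y)
--
-- def ListHouses(route):
--   """Given a list of steps, return all the houses on the route."""
--   all_houses = defaultdict(lambda: 0)
--   last_loc = (0, 0)
--   all_houses[last_loc] += 1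
--   for step in route:
--     next_loc = NextLocation(last_loc, step)
--     all_houses[next_loc] += 1
--     last_loc = next_loc
--   return all_houses
-- ===== SOURCE B (Python) =====
-- from collections import defaultdict
--
-- DELTAS = {'<': (-1, 0), '>': (1, 0), '^': (0, 1), 'v': (0, -1)}
--
-- def ListHouses(route):
--   """Given a list of steps, return all the houses on the route."""
--   # Phase 1: the trajectory of visited coordinates (KeyError on a bad step;
--   # A raises a bare Exception there, both excluded by the stated precondition).
--   houses = [(0, 0)]
--   for c in route:
--     dx, dy = DELTAS[c]
--     x, y = houses[-1]
--     houses.append((x + dx, y + dy))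
--   # Phase 2: no running tally at all — the distinct houses in first-visit
--   # order, each count obtained by a full scan of the trajectory.
--   result = defaultdict(lambda: 0)
--   for h in dict.fromkeys(houses):
--     result[h] = houses.count(h)
--   return result
-- ===== Notes on version B (the rewrite author's own statement) =====
-- stated objective: alternative
-- what changed: A maintains running per-house counts in a dict while walking; B never counts during the walk: it materialises the trajectory, dedupes it in first-visit order, and derives each house's count by a separate full scan (list.count), making the tally quadratic brute force instead of incremental hashing.
import Mathlib
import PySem

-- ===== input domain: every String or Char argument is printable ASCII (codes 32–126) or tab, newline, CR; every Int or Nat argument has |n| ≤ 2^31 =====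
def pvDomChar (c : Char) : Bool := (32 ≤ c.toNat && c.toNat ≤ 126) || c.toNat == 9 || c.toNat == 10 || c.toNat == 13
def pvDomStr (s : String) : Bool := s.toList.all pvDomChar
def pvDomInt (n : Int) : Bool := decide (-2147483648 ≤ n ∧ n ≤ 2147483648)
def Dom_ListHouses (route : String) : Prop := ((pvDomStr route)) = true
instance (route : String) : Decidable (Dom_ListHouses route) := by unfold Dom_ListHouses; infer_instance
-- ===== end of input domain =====

-- B drops A's running tally: it builds the trajectory, dedupes it in first-visit order
-- and counts each house by a full scan (alternative decomposition; B is quadratic).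

-- ===== PORT A =====
-- NextLocation: none = the bare 'raise Exception' on a step other than less-than, greater-than, caret or v
def pvNextLocation (coord : Int × Int) (step : Char) : Option (Int × Int) :=
  let x := coord.1
  let y := coord.2
  if step = '<' then some (x - 1, y)
  else if step = '>' then some (x + 1, y)
  else if step = '^' then some (x, y + 1)
  else if step = 'v' then some (x, y - 1)
  else none

-- the for-loop of A over the route, state = (all_houses, last_loc); the
-- 'none' branch is the exception path, excluded by Pre_ListHouses
def pvLoopA (d : PySem.Dict (Int × Int) Int) (loc : Int × Int) : List Char → PySem.Dict (Int × Int) Int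
  | [] => d
  | c :: cs =>
    match pvNextLocation loc c with
    | none => d
    | some p => pvLoopA (d.insert p (d.getD p 0 + 1)) p cs

def ListHouses (route : String) : List (Int × Int × Int) :=
  (pvLoopA ((PySem.Dict.empty : PySem.Dict (Int × Int) Int).insert ((0 : Int), (0 : Int)) 1)
      (0, 0) route.toList).items.map (fun p => (p.1.1, p.1.2, p.2))

-- ===== PORT B =====
-- the DELTAS table lookup; none = the KeyError path on a step not in DELTAS, excluded by Pre_ListHouses
def pvDelta (c : Char) : Option (Int × Int) :=
  if c = '<' then some (-1, 0)
  else if c = '>' then some (1, 0)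
  else if c = '^' then some (0, 1)
  else if c = 'v' then some (0, -1)
  else none

-- phase 1 of B: the trajectory list 'houses' (seed included); the truncation
-- on a bad step is the KeyError path, excluded by Pre_ListHouses
def pvTraj (loc : Int × Int) : List Char → List (Int × Int)
  | [] => [loc]
  | c :: cs =>
    match pvDelta c with
    | none => [loc]
    | some d => loc :: pvTraj (loc.1 + d.1, loc.2 + d.2) cs

def ListHouses_alt (route : String) : List (Int × Int × Int) :=
  -- phase 2 of B: dict.fromkeys (= PySem.List.dedup, first-visit order), each
  -- count a full scan houses.count(h), assigned into the defaultdict in order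
  let houses := pvTraj (0, 0) route.toList
  ((PySem.List.dedup houses).foldl
      (fun d h => d.insert h ((houses.count h : Nat) : Int))
      (PySem.Dict.empty : PySem.Dict (Int × Int) Int)).items.map
    (fun p => (p.1.1, p.1.2, p.2))

-- ===== PRECONDITION & SPEC =====
-- Pre_ excludes routes containing a step character other than less-than, greater-than, caret or v, on which A raises a bare Exception.
def Pre_ListHouses (route : String) : Prop :=
  (route.toList.all (fun c => c = '<' || c = '>' || c = '^' || c = 'v')) = true
instance (route : String) : Decidable (Pre_ListHouses route) := by unfold Pre_ListHouses; infer_instance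

def pvWitness_ListHouses : String := "^>v<"

def Spec_ListHouses (route : String) (out : List (Int × Int × Int)) : Prop := out = ListHouses_alt route
instance (route : String) (out : List (Int × Int × Int)) : Decidable (Spec_ListHouses route out) := by unfold Spec_ListHouses; infer_instance

-- ===== CLAIM (what is proved, stated in full; the proofs are below) =====
def Claim_equal_ListHouses : Prop := ∀ (route : String), Dom_ListHouses route → Pre_ListHouses route → Spec_ListHouses route (ListHouses route)

-- ===== LEMMAS AND PROOFS =====

-- the trajectory always starts with its seed
theorem pvTraj_head (loc : Int × Int) (cs : List Char) :
    pvTraj loc cs = loc :: (pvTraj loc cs).tail := by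
  cases cs with
  | nil => rfl
  | cons c cs =>
    simp only [pvTraj]
    cases pvDelta c <;> rfl

-- A's loop tallies exactly the tail of the trajectory
theorem pvLoopA_eq_foldl_traj (cs : List Char)
    (h : ∀ c ∈ cs, c = '<' ∨ c = '>' ∨ c = '^' ∨ c = 'v') :
    ∀ (d : PySem.Dict (Int × Int) Int) (loc : Int × Int),
      pvLoopA d loc cs =
        ((pvTraj loc cs).tail).foldl (fun d p => d.insert p (d.getD p 0 + 1)) d := by
  induction cs with
  | nil => intro d loc; rfl
  | cons c cs ih =>
    intro d loc
    have hc := h c (List.mem_cons_self ..)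
    have h' : ∀ c' ∈ cs, c' = '<' ∨ c' = '>' ∨ c' = '^' ∨ c' = 'v' :=
      fun c' hm => h c' (List.mem_cons_of_mem _ hm)
    rcases hc with rfl | rfl | rfl | rfl <;>
      · simp only [pvLoopA, pvTraj, pvNextLocation, pvDelta, Char.reduceEq, reduceIte,
          List.tail_cons, sub_eq_add_neg, add_zero]
        rw [ih h']
        conv_rhs => rw [pvTraj_head]
        rw [List.foldl_cons]

-- B's per-key-scan dict has the same items list as Counter(houses)
theorem pvAltItems_eq_counter (houses : List (Int × Int)) :
    ((PySem.List.dedup houses).foldl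
        (fun d h => d.insert h ((houses.count h : Nat) : Int))
        (PySem.Dict.empty : PySem.Dict (Int × Int) Int)).items =
      (PySem.Dict.counter houses).items := by
  rw [PySem.Dict.items_counter]
  have hfresh : ∀ a ∈ PySem.List.dedup houses,
      (PySem.Dict.empty : PySem.Dict (Int × Int) Int).contains (id a) = false := by
    intro a _; exact PySem.Dict.contains_empty ..
  have hnd : ((PySem.List.dedup houses).map id).Nodup := by
    simp only [List.map_id]
    exact PySem.List.nodup_dedup houses
  have := PySem.Dict.items_foldl_insert_fresh
    (l := PySem.List.dedup houses) (k := id)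
    (v := fun h => ((houses.count h : Nat) : Int))
    (d := (PySem.Dict.empty : PySem.Dict (Int × Int) Int)) hfresh hnd
  simp [PySem.List.dedup_eq_ofList] at this
  exact this

theorem ListHouses_eq_alt (route : String) (h : Pre_ListHouses route) :
    ListHouses route = ListHouses_alt route := by
  have hall : ∀ c ∈ route.toList, c = '<' ∨ c = '>' ∨ c = '^' ∨ c = 'v' := by
    have := h
    simp [Pre_ListHouses, List.all_eq_true] at this
    intro c hc
    rcases this c hc with ((h1 | h2) | h3) | h4 <;> tauto
  simp only [ListHouses, ListHouses_alt]
  rw [pvAltItems_eq_counter]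
  rw [pvLoopA_eq_foldl_traj route.toList hall]
  rw [show ((PySem.Dict.empty : PySem.Dict (Int × Int) Int).insert ((0 : Int), (0 : Int)) 1) =
      List.foldl (fun d p => d.insert p (d.getD p 0 + 1))
        (PySem.Dict.empty : PySem.Dict (Int × Int) Int) [((0 : Int), (0 : Int))] from rfl]
  rw [← List.foldl_append, List.singleton_append, ← pvTraj_head]
  rw [PySem.Dict.foldl_insert_getD_add_one_eq_counter]

-- ===== VERDICT (by name: the statement is the Claim_ definition above) =====
theorem ListHouses_spec : Claim_equal_ListHouses := by
  intro route _ hpre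
  exact ListHouses_eq_alt route hpre
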